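-- pv_equiv track=rewrite | github.com/idawnlight/ShichiZip | project/scripts/generate_strings.py | generate_strings_content
-- ===== SOURCE A (Python) =====
-- def escape_strings_value(text: str) -> str:
--     """Escape text for use in a .strings file value."""
--     return (text
--             .replace('\\', '\\\\')
--             .replace('"', '\\"')
--             .replace('\n', '\\n')
--             .replace('\t', '\\t'))
--
-- def generate_strings_content(key_translations: dict[str, str]) -> str:
--     """Generate the content of a .strings file."""
--     lines = []
--     prev_section = None
--
--     for key in sorted(key_translations.keys()):
--         value = key_translations[key]
--         # Group by first dotted component
--         section = key.split('.')[0]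
--         if prev_section is not None and section != prev_section:
--             lines.append('')
--         prev_section = section
--
--         escaped_value = escape_strings_value(value)
--         lines.append(f'"{key}" = "{escaped_value}";')
--
--     return '\n'.join(lines) + '\n'
-- ===== SOURCE B (Python) =====
-- def escape_strings_value(text: str) -> str:
--     """Escape text for use in a .strings file value."""
--     return (text
--             .replace('\\', '\\\\')
--             .replace('"', '\\"')
--             .replace('\n', '\\n')
--             .replace('\t', '\\t'))
--
-- def generate_strings_content(key_translations: dict[str, str]) -> str:
--     """Generate the content of a .strings file.
--
--     Group-then-render: split the sorted keys into consecutive runs sharing the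
--     same first dotted component, render each run as a block, join blocks with a
--     blank line.
--     """
--     keys = sorted(key_translations)
--     blocks = []
--     i, n = 0, len(keys)
--     while i < n:
--         section = keys[i].split('.')[0]
--         j = i
--         while j < n and keys[j].split('.')[0] == section:
--             j += 1
--         blocks.append('\n'.join(
--             '"%s" = "%s";' % (k, escape_strings_value(key_translations[k]))
--             for k in keys[i:j]))
--         i = j
--     return '\n\n'.join(blocks) + '\n'
-- ===== Notes on version B (the rewrite author's own statement) =====
-- stated objective: alternative
-- what changed: Replaces A's single pass with a running prev_section sentinel that inlines blank lines into one flat line list by a group-then-render pass: the sorted keys are split into consecutive runs sharing the first dotted component, each run is rendered as a block joined with '\n', and the blocks are joined with '\n\n'.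
import Mathlib
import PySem

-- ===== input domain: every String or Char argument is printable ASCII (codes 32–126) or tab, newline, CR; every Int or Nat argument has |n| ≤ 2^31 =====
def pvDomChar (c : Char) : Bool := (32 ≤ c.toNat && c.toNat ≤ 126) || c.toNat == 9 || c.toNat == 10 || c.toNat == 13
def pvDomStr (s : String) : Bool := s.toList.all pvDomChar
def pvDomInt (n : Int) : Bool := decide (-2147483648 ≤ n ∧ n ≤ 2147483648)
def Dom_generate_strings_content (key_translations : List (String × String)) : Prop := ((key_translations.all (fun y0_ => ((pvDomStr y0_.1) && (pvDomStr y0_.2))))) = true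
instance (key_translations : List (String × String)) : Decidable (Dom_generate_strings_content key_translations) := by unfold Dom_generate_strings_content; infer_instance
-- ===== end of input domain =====

-- B renders the sorted keys group-by-group (runs split off, blocks joined with "\n\n")
-- instead of A's running prev_section sentinel inserting blank lines into one flat list;
-- same cost, different decomposition.

-- ===== PORT A =====

-- shared module helper: escape_strings_value (the chained .replace calls)
def escape_strings_value (text : String) : String :=
  PySem.Str.replace
    (PySem.Str.replace
      (PySem.Str.replace
        (PySem.Str.replace text "\\" "\\\\")
        "\"" "\\\"")
      "\n" "\\n")
    "\t" "\\t"

-- key.split('.')[0]; split? with a nonempty separator always returns some nonempty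
-- list, so the getD/headD defaults are never used (exact)
def sectionOf (key : String) : String :=
  ((PySem.Str.split? key ".").getD []).headD ""

-- f'"{key}" = "{escaped_value}";'
def lineOf (key value : String) : String :=
  "\"" ++ key ++ "\" = \"" ++ escape_strings_value value ++ "\";"

-- loop body of A: state = (lines, prev_section); d[key] is exact via getD since
-- every iterated key is a key of d (KeyError impossible)
def stepA (d : PySem.Dict String String) (st : List String × Option String)
    (key : String) : List String × Option String :=
  let value := d.getD key ""
  let sec := sectionOf key
  let lines := match st.2 with
    | none => st.1
    | some p => if sec ≠ p then st.1 ++ [""] else st.1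
  (lines ++ [lineOf key value], some sec)

def generate_strings_content (key_translations : List (String × String)) : String :=
  let d := PySem.Dict.ofList key_translations
  let r := (PySem.List.sorted d.keys (fun x => x) false).foldl (stepA d) ([], none)
  PySem.Str.join "\n" r.1 ++ "\n"

-- ===== PORT B =====

-- the outer while loop of B: split the sorted keys into maximal consecutive runs
-- with equal first dotted component (the inner 'while j < n' scan = takeWhile,
-- 'i = j' = dropWhile)
def splitRuns : List String → List (List String)
  | [] => []
  | k :: rest =>
    (k :: rest.takeWhile (fun x => sectionOf x == sectionOf k)) ::
      splitRuns (rest.dropWhile (fun x => sectionOf x == sectionOf k))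
termination_by ks => ks.length
decreasing_by
  exact Nat.lt_succ_of_le (List.length_dropWhile_le _ _)

def generate_strings_content_alt (key_translations : List (String × String)) : String :=
  let d := PySem.Dict.ofList key_translations
  let keys := PySem.List.sorted d.keys (fun x => x) false
  let blocks := (splitRuns keys).map
    (fun g => PySem.Str.join "\n" (g.map (fun k => lineOf k (d.getD k ""))))
  PySem.Str.join "\n\n" blocks ++ "\n"

-- ===== PRECONDITION & SPEC =====
def Spec_generate_strings_content (key_translations : List (String × String)) (out : String) : Prop := out = generate_strings_content_alt key_translations
instance (key_translations : List (String × String)) (out : String) : Decidable (Spec_generate_strings_content key_translations out) := by unfold Spec_generate_strings_content; infer_instance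

-- ===== CLAIM (what is proved, stated in full; the proofs are below) =====
def Claim_equal_generate_strings_content : Prop := ∀ (key_translations : List (String × String)), Dom_generate_strings_content key_translations → Spec_generate_strings_content key_translations (generate_strings_content key_translations)

-- ===== LEMMAS AND PROOFS =====

-- the line A/B emit for key k under dict d
def lineD (d : PySem.Dict String String) (k : String) : String :=
  lineOf k (d.getD k "")

-- the lines A appends after the first key, once prev_section = some s
def rrA (d : PySem.Dict String String) (s : String) : List String → List String
  | [] => []
  | k :: rest =>
    (if sectionOf k ≠ s then [""] else []) ++ (lineD d k :: rrA d (sectionOf k) rest)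

theorem foldA_some (d : PySem.Dict String String) :
    ∀ (ks : List String) (lines : List String) (s : String),
      (ks.foldl (stepA d) (lines, some s)).1 = lines ++ rrA d s ks := by
  intro ks
  induction ks with
  | nil => intro lines s; simp [rrA]
  | cons k rest ih =>
    intro lines s
    by_cases h : sectionOf k ≠ s <;>
      simp [stepA, rrA, lineD, h, ih, List.append_assoc]

theorem join_cons_cons (sep p q : String) (rest : List String) :
    PySem.Str.join sep (p :: q :: rest) = p ++ sep ++ PySem.Str.join sep (q :: rest) := by
  simp [PySem.Str.join, PySem.Chars.join_cons_cons, String.append_assoc]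

theorem join_single (sep p : String) : PySem.Str.join sep [p] = p := by
  simp [PySem.Str.join, PySem.Chars.join, List.intercalate]

theorem join_append_cons (sep y : String) (ys : List String) :
    ∀ (xs : List String), xs ≠ [] →
      PySem.Str.join sep (xs ++ y :: ys)
        = PySem.Str.join sep xs ++ sep ++ PySem.Str.join sep (y :: ys) := by
  intro xs
  induction xs with
  | nil => intro h; exact absurd rfl h
  | cons x t ih =>
    intro _
    cases t with
    | nil => rw [List.singleton_append, join_cons_cons, join_single]
    | cons x' t' =>
      simp only [List.cons_append] at ih ⊢
      rw [join_cons_cons, ih (by simp), join_cons_cons sep x x' t']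
      simp [String.append_assoc]

theorem nl_nl (J : String) : "\n" ++ ("\n" ++ J) = "\n\n" ++ J := by
  rw [← String.append_assoc]
  have h : ("\n" ++ "\n" : String) = "\n\n" := by decide
  rw [h]

theorem splitRuns_nil : splitRuns [] = [] := by rw [splitRuns]

theorem splitRuns_cons (k : String) (rest : List String) :
    splitRuns (k :: rest)
      = (k :: rest.takeWhile (fun x => sectionOf x == sectionOf k)) ::
          splitRuns (rest.dropWhile (fun x => sectionOf x == sectionOf k)) := by
  rw [splitRuns]

-- rrA across a run boundary: the takeWhile part emits plain lines, and the first
-- key of the dropWhile part is preceded by the blank line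
theorem rrA_span (d : PySem.Dict String String) :
    ∀ (ks : List String) (s : String),
      rrA d s ks
        = (ks.takeWhile (fun x => sectionOf x == s)).map (lineD d) ++
          (match ks.dropWhile (fun x => sectionOf x == s) with
            | [] => []
            | k' :: r' => "" :: lineD d k' :: rrA d (sectionOf k') r') := by
  intro ks
  induction ks with
  | nil => intro s; simp [rrA]
  | cons k rest ih =>
    intro s
    by_cases h : sectionOf k = s
    · rw [rrA]
      simp [h, ih]
    · rw [rrA]
      simp [h]

theorem main_join (d : PySem.Dict String String) :
    ∀ (n : Nat) (ks : List String) (k : String), ks.length ≤ n →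
      PySem.Str.join "\n" (lineD d k :: rrA d (sectionOf k) ks)
        = PySem.Str.join "\n\n" ((splitRuns (k :: ks)).map
            (fun g => PySem.Str.join "\n" (g.map (lineD d)))) := by
  intro n
  induction n with
  | zero =>
    intro ks k hn
    cases ks with
    | cons a b => simp at hn
    | nil =>
      rw [splitRuns_cons]
      simp [rrA, splitRuns_nil, join_single]
  | succ n ih =>
    intro ks k hn
    rw [rrA_span, splitRuns_cons]
    cases hdw : ks.dropWhile (fun x => sectionOf x == sectionOf k) with
    | nil =>
      have htw : ks.takeWhile (fun x => sectionOf x == sectionOf k) = ks := by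
        have := List.takeWhile_append_dropWhile
          (p := fun x => sectionOf x == sectionOf k) (l := ks)
        rw [hdw, List.append_nil] at this; exact this
      simp only [htw, List.append_nil, splitRuns_nil, List.map_cons, List.map_nil]
      rw [join_single]
    | cons k' r' =>
      have hlt : r'.length ≤ n := by
        have h1 : (ks.dropWhile (fun x => sectionOf x == sectionOf k)).length ≤ ks.length :=
          List.length_dropWhile_le _ _
        rw [hdw] at h1
        simp at h1
        omega
      rw [show (lineD d k ::
            ((ks.takeWhile (fun x => sectionOf x == sectionOf k)).map (lineD d) ++
              "" :: lineD d k' :: rrA d (sectionOf k') r'))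
          = (lineD d k ::
              (ks.takeWhile (fun x => sectionOf x == sectionOf k)).map (lineD d)) ++
            "" :: lineD d k' :: rrA d (sectionOf k') r' from by simp]
      rw [join_append_cons _ _ _ _ (by simp), join_cons_cons, ih r' k' hlt,
        splitRuns_cons]
      simp only [List.map_cons]
      rw [join_cons_cons "\n\n"]
      simp only [String.append_assoc, String.empty_append]
      rw [nl_nl]

-- ===== VERDICT (by name: the statement is the Claim_ definition above) =====
theorem generate_strings_content_spec : Claim_equal_generate_strings_content := by
  intro kt _
  unfold Spec_generate_strings_content generate_strings_content generate_strings_content_alt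
  dsimp only
  cases hks : PySem.List.sorted (PySem.Dict.ofList kt).keys (fun x => x) false with
  | nil =>
    simp [splitRuns_nil, PySem.Str.join, PySem.Chars.join, List.intercalate]
  | cons k rest =>
    have h1 : ((k :: rest).foldl (stepA (PySem.Dict.ofList kt)) ([], none)).1
        = lineD (PySem.Dict.ofList kt) k :: rrA (PySem.Dict.ofList kt) (sectionOf k) rest := by
      rw [List.foldl_cons]
      have : stepA (PySem.Dict.ofList kt) ([], none) k
          = ([lineD (PySem.Dict.ofList kt) k], some (sectionOf k)) := by
        simp [stepA, lineD]
      rw [this, foldA_some]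
      simp
    rw [h1, main_join (PySem.Dict.ofList kt) rest.length rest k le_rfl]
    rfl
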